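-- pv_equiv track=rewrite | github.com/ravish-oo/opoch-toe-arcagi | src/arcbit/kernel/period.py | _build_residue_masks
-- ===== SOURCE A (Python) =====
-- from typing import Dict, List, Tuple, Optional
--
-- def _build_residue_masks(
--     p_r: Optional[int],
--     p_c: Optional[int],
--     H: int,
--     W: int
-- ) -> List[List[int]]:
--     """
--     Build residue-class masks with phase (0,0).
--
--     Args:
--         p_r: Row period (>= 2) or None.
--         p_c: Column period (>= 2) or None.
--         H: Height.
--         W: Width.
--
--     Returns:
--         List of residue masks (each is list[int] of length H).
--         Ordered row-major: residue i*p_c + j for i in [0..p_r-1], j in [0..p_c-1].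
--
--     Spec:
--         WO-02: Phase fixed at (0,0).
--         Residue mask for (i, j) has bit set at (r, c) iff:
--           r % p_r == i and c % p_c == j
--     """
--     if p_r is None and p_c is None:
--         return []
--
--     # Internally treat missing period as 1 for mask construction
--     p_r_internal = p_r if p_r is not None else 1
--     p_c_internal = p_c if p_c is not None else 1
--
--     residues = []
--
--     for i in range(p_r_internal):
--         for j in range(p_c_internal):
--             # Build mask for residue (i, j)
--             mask_rows = []
--             for r in range(H):
--                 row_mask = 0
--                 for c in range(W):
--                     # Check if (r, c) belongs to residue (i, j)
--                     if (r % p_r_internal == i) and (c % p_c_internal == j):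
--                         row_mask |= (1 << c)
--                 mask_rows.append(row_mask)
--
--             residues.append(mask_rows)
--
--     return residues
-- ===== SOURCE B (Python) =====
-- def _build_residue_masks(p_r, p_c, H, W):
--     if p_r is None and p_c is None:
--         return []
--     pr = p_r if p_r is not None else 1
--     pc = p_c if p_c is not None else 1
--     if pr <= 0 or pc <= 0:
--         return []
--     # Column-residue bit patterns, computed once: col[j] has bit c set iff c % pc == j.
--     col = [0] * pc
--     for c in range(W):
--         col[c % pc] |= 1 << c
--     res = []
--     for i in range(pr):
--         for j in range(pc):
--             pat = col[j]
--             res.append([pat if r % pr == i else 0 for r in range(H)])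
--     return res
-- ===== Notes on version B (the rewrite author's own statement) =====
-- stated objective: faster
-- what changed: B precomputes the W-bit column pattern for each column residue once (one pass over columns with a per-residue accumulator array) and then emits each (i,j) mask by a row-residue check per row, instead of A's re-scanning all W columns for every residue pair and every row.
import Mathlib
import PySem

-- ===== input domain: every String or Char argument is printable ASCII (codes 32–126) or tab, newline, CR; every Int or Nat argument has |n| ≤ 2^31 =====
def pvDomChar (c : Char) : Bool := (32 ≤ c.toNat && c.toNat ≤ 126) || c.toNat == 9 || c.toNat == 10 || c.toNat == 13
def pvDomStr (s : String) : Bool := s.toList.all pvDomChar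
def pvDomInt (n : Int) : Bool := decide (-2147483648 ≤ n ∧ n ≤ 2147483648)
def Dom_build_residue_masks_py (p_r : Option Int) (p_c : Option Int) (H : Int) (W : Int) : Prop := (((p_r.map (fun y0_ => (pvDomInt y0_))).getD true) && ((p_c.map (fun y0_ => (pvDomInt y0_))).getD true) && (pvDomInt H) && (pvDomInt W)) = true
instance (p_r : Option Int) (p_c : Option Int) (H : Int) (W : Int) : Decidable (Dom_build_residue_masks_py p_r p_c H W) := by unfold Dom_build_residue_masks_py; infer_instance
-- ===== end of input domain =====

-- B precomputes the per-column-residue bit pattern once and reuses it for each row,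
-- replacing A's per-(i,j,r) inner column scan (objective: faster, asymptotic).

-- ===== PORT A =====
def build_residue_masks_py (p_r : Option Int) (p_c : Option Int) (H : Int) (W : Int) : List (List Int) :=
  if p_r = none ∧ p_c = none then []
  else
    let pr := p_r.getD 1
    let pc := p_c.getD 1
    (PySem.List.pyRange 0 pr 1).foldl (fun residues i =>
      (PySem.List.pyRange 0 pc 1).foldl (fun residues j =>
        let mask_rows := (PySem.List.pyRange 0 H 1).foldl (fun mask_rows r =>
          let row_mask := (PySem.List.pyRange 0 W 1).foldl (fun row_mask c =>
            if PySem.Int.mod r pr = i ∧ PySem.Int.mod c pc = j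
            then PySem.Int.bor row_mask ((1 : Int) <<< c.toNat) else row_mask) 0
          mask_rows ++ [row_mask]) []
        residues ++ [mask_rows]) residues) []

-- ===== PORT B =====
def build_residue_masks_py_alt (p_r : Option Int) (p_c : Option Int) (H : Int) (W : Int) : List (List Int) :=
  if p_r = none ∧ p_c = none then []
  else
    let pr := p_r.getD 1
    let pc := p_c.getD 1
    if pr ≤ 0 ∨ pc ≤ 0 then []
    else
      let col := (PySem.List.pyRange 0 W 1).foldl (fun col c =>
        let k := (PySem.Int.mod c pc).toNat
        col.set k (PySem.Int.bor (col.getD k 0) ((1 : Int) <<< c.toNat)))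
        (List.replicate pc.toNat 0)
      (PySem.List.pyRange 0 pr 1).foldl (fun res i =>
        (PySem.List.pyRange 0 pc 1).foldl (fun res j =>
          let pat := col.getD j.toNat 0
          res ++ [(PySem.List.pyRange 0 H 1).map (fun r =>
            if PySem.Int.mod r pr = i then pat else 0)]) res) []

-- ===== PRECONDITION & SPEC =====
def Spec_build_residue_masks_py (p_r : Option Int) (p_c : Option Int) (H : Int) (W : Int) (out : List (List Int)) : Prop := out = build_residue_masks_py_alt p_r p_c H W
instance (p_r : Option Int) (p_c : Option Int) (H : Int) (W : Int) (out : List (List Int)) : Decidable (Spec_build_residue_masks_py p_r p_c H W out) := by unfold Spec_build_residue_masks_py; infer_instance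

-- ===== CLAIM (what is proved, stated in full; the proofs are below) =====
def Claim_equal_build_residue_masks_py : Prop := ∀ (p_r : Option Int) (p_c : Option Int) (H : Int) (W : Int), Dom_build_residue_masks_py p_r p_c H W → Spec_build_residue_masks_py p_r p_c H W (build_residue_masks_py p_r p_c H W)

-- ===== LEMMAS AND PROOFS =====

-- the column pattern for residue j, as A computes it per row
def colFoldA (pc j : Int) (W : Int) : Int :=
  (PySem.List.pyRange 0 W 1).foldl (fun a c =>
    if PySem.Int.mod c pc = j then PySem.Int.bor a ((1 : Int) <<< c.toNat) else a) 0

-- A's inner per-row fold collapses to a single conditional on the row residue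
lemma rowA_eq (pr pc i j r W : Int) :
    (PySem.List.pyRange 0 W 1).foldl (fun a c =>
      if PySem.Int.mod r pr = i ∧ PySem.Int.mod c pc = j
      then PySem.Int.bor a ((1 : Int) <<< c.toNat) else a) 0
    = if PySem.Int.mod r pr = i then colFoldA pc j W else 0 := by
  by_cases h : PySem.Int.mod r pr = i <;> simp [h, colFoldA]

-- B's array loop maintains: entry k holds A's single-residue fold for residue k
lemma col_invariant (pc : Int) (hpc : 0 < pc) (cs : List Int) (hcs : ∀ c ∈ cs, 0 ≤ c)
    (col : List Int) (hlen : col.length = pc.toNat) (k : Nat) (hk : k < pc.toNat) :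
    (cs.foldl (fun col c =>
        let m := (PySem.Int.mod c pc).toNat
        col.set m (PySem.Int.bor (col.getD m 0) ((1 : Int) <<< c.toNat))) col).getD k 0
    = cs.foldl (fun a c =>
        if (PySem.Int.mod c pc).toNat = k then PySem.Int.bor a ((1 : Int) <<< c.toNat) else a)
        (col.getD k 0) := by
  induction cs generalizing col with
  | nil => rfl
  | cons c cs ih =>
    have hm0 : 0 ≤ PySem.Int.mod c pc := PySem.Int.mod_nonneg c hpc
    have hmlt : PySem.Int.mod c pc < pc := PySem.Int.mod_lt c hpc
    have hmN : (PySem.Int.mod c pc).toNat < pc.toNat := by omega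
    simp only [List.foldl_cons]
    rw [ih (fun c hc => hcs c (List.mem_cons_of_mem _ hc)) _
      (by rw [List.length_set]; exact hlen)]
    congr 1
    by_cases h : (PySem.Int.mod c pc).toNat = k
    · subst h
      simp only [List.getD_eq_getElem?_getD]
      rw [List.getElem?_set_self (by omega)]
      simp
    · simp only [if_neg h, List.getD_eq_getElem?_getD]
      rw [List.getElem?_set_ne (by omega)]

-- B's column entry j equals A's per-residue column fold
lemma col_entry (pc : Int) (hpc : 0 < pc) (W j : Int) (hj0 : 0 ≤ j) (hj : j < pc) :
    ((PySem.List.pyRange 0 W 1).foldl (fun col c =>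
        let k := (PySem.Int.mod c pc).toNat
        col.set k (PySem.Int.bor (col.getD k 0) ((1 : Int) <<< c.toNat)))
      (List.replicate pc.toNat 0)).getD j.toNat 0
    = colFoldA pc j W := by
  rw [col_invariant pc hpc _ (fun c hc => (PySem.List.mem_pyRange_one.mp hc).1)
    _ (List.length_replicate) j.toNat (by omega)]
  unfold colFoldA
  rw [List.getD_eq_getElem?_getD, List.getElem?_replicate]
  simp only [if_pos (by omega : j.toNat < pc.toNat), Option.getD_some]
  apply PySem.List.foldl_congr_mem
  intro a c hc
  have hm0 : 0 ≤ PySem.Int.mod c pc := PySem.Int.mod_nonneg c hpc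
  have : ((PySem.Int.mod c pc).toNat = j.toNat) ↔ (PySem.Int.mod c pc = j) := by omega
  simp [this]

-- the (i,j) mask: A's triple loop equals B's map over precomputed pattern
lemma mask_eq (pr pc : Int) (hpc : 0 < pc) (H W i j : Int) (hj0 : 0 ≤ j) (hj : j < pc) :
    (PySem.List.pyRange 0 H 1).foldl (fun mask_rows r =>
      mask_rows ++ [(PySem.List.pyRange 0 W 1).foldl (fun a c =>
        if PySem.Int.mod r pr = i ∧ PySem.Int.mod c pc = j
        then PySem.Int.bor a ((1 : Int) <<< c.toNat) else a) 0]) []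
    = (PySem.List.pyRange 0 H 1).map (fun r =>
        if PySem.Int.mod r pr = i
        then ((PySem.List.pyRange 0 W 1).foldl (fun col c =>
            let k := (PySem.Int.mod c pc).toNat
            col.set k (PySem.Int.bor (col.getD k 0) ((1 : Int) <<< c.toNat)))
          (List.replicate pc.toNat 0)).getD j.toNat 0
        else 0) := by
  rw [PySem.List.foldl_append_singleton_eq_map]
  simp only [List.nil_append]
  apply List.map_congr_left
  intro r _
  rw [rowA_eq, col_entry pc hpc W j hj0 hj]

-- fold over an empty-body loop keeps the accumulator
lemma foldl_id {α β : Type} (l : List β) (init : α) :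
    l.foldl (fun a _ => a) init = init := by
  induction l generalizing init with
  | nil => rfl
  | cons x xs ih => exact ih init

theorem core_eq (pr pc H W : Int) :
    (PySem.List.pyRange 0 pr 1).foldl (fun residues i =>
      (PySem.List.pyRange 0 pc 1).foldl (fun residues j =>
        residues ++ [(PySem.List.pyRange 0 H 1).foldl (fun mask_rows r =>
          mask_rows ++ [(PySem.List.pyRange 0 W 1).foldl (fun a c =>
            if PySem.Int.mod r pr = i ∧ PySem.Int.mod c pc = j
            then PySem.Int.bor a ((1 : Int) <<< c.toNat) else a) 0]) []]) residues) []
    = (if pr ≤ 0 ∨ pc ≤ 0 then []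
       else
        let col := (PySem.List.pyRange 0 W 1).foldl (fun col c =>
          let k := (PySem.Int.mod c pc).toNat
          col.set k (PySem.Int.bor (col.getD k 0) ((1 : Int) <<< c.toNat)))
          (List.replicate pc.toNat 0)
        (PySem.List.pyRange 0 pr 1).foldl (fun res i =>
          (PySem.List.pyRange 0 pc 1).foldl (fun res j =>
            res ++ [(PySem.List.pyRange 0 H 1).map (fun r =>
              if PySem.Int.mod r pr = i then col.getD j.toNat 0 else 0)]) res) []) := by
  by_cases hdeg : pr ≤ 0 ∨ pc ≤ 0
  · rw [if_pos hdeg]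
    rcases hdeg with h | h
    · simp only [PySem.List.pyRange_one_eq_nil h, List.foldl_nil]
    · simp only [PySem.List.pyRange_one_eq_nil h, List.foldl_nil]
      exact foldl_id _ []
  · rw [if_neg hdeg]
    apply PySem.List.foldl_congr_mem
    intro res i _
    apply PySem.List.foldl_congr_mem
    intro res j hj
    have := PySem.List.mem_pyRange_one.mp hj
    rw [mask_eq pr pc (by omega) H W i j this.1 this.2]

-- ===== VERDICT (by name: the statement is the Claim_ definition above) =====
theorem build_residue_masks_py_spec : Claim_equal_build_residue_masks_py := by
  intro p_r p_c H W _
  show build_residue_masks_py p_r p_c H W = build_residue_masks_py_alt p_r p_c H W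
  unfold build_residue_masks_py build_residue_masks_py_alt
  by_cases h : p_r = none ∧ p_c = none
  · rw [if_pos h, if_pos h]
  · rw [if_neg h, if_neg h]
    exact core_eq _ _ H W
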